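-- pv_equiv track=rewrite | github.com/comersaglam/Competitive_Programming_COS | Inzva_Summer24/inzva_toast.py | toasts
-- ===== SOURCE A (Python) =====
-- MOD = 10**9+7
--
-- def fexp(a,b):#a^b
--     if b == 0: return 1
--     if b == 1: return a
--     if b % 2 == 0: return fexp(a,b//2)**2 % MOD
--     else: return fexp(a,b//2)**2 * a % MOD
--
-- def toasts(num):
--     count = 0
--     n = len(num)
--     for i in range(n):
--         temp = (num[i]-1) * fexp(3,len(num)-i-1) % MOD
--         count = (count + temp) % MOD
--         temp = 4 * fexp(3,len(num)-i-1) % MOD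
--         count = (count + temp) % MOD
--     return count
-- ===== SOURCE B (Python) =====
-- MOD = 10**9+7
--
-- def toasts(num):
--     val = 0
--     for x in num:
--         val = (val * 3 + (x + 3)) % MOD
--     return val
-- ===== Notes on version B (the rewrite author's own statement) =====
-- stated objective: faster
-- what changed: Replaces the per-index recursive modular exponentiation fexp(3, n-i-1) with a single left-to-right Horner accumulator val = (val*3 + (x+3)) % MOD, eliminating the fexp helper entirely.
import Mathlib
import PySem

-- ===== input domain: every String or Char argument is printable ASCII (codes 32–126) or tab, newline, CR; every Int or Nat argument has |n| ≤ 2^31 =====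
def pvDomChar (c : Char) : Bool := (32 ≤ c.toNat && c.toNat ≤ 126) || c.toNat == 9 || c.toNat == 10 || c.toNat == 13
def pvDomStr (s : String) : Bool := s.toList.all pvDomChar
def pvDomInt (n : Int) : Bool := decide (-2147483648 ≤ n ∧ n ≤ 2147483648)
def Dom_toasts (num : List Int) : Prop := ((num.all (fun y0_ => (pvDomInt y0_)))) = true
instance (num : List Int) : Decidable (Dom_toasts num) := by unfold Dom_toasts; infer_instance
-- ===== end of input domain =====

-- B replaces A's per-index modular exponentiation (fexp) with a single Horner multiply-and-add pass (faster).

-- ===== PORT A =====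
-- (Python constant MOD; named pyMOD because "[MOD" is a reserved Mathlib token)
def pyMOD : Int := 10^9+7

-- Python: 'if b == 0: return 1'.  toasts only calls fexp with b ≥ 0 (Python recurses forever for
-- b < 0), so the guard 'b ≤ 0' is exact on every reachable input and makes the recursion terminate.
def fexp (a b : Int) : Int :=
  if b ≤ 0 then 1
  else if b = 1 then a
  else if PySem.Int.mod b 2 = 0 then PySem.Int.mod ((fexp a (PySem.Int.floordiv b 2)) ^ 2) pyMOD
  else PySem.Int.mod ((fexp a (PySem.Int.floordiv b 2)) ^ 2 * a) pyMOD
termination_by b.toNat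
decreasing_by
  all_goals
    have h2 : PySem.Int.floordiv b 2 = b / 2 := PySem.Int.floordiv_eq_ediv_of_pos (by norm_num)
    rw [h2]; omega

def toasts (num : List Int) : Int :=
  (PySem.List.pyRange 0 (PySem.List.len num) 1).foldl (fun count i =>
    let temp := PySem.Int.mod ((PySem.List.pyGetD num i 0 - 1) * fexp 3 (PySem.List.len num - i - 1)) pyMOD
    let count := PySem.Int.mod (count + temp) pyMOD
    let temp := PySem.Int.mod (4 * fexp 3 (PySem.List.len num - i - 1)) pyMOD
    PySem.Int.mod (count + temp) pyMOD) 0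

-- ===== PORT B =====
def toasts_alt (num : List Int) : Int :=
  num.foldl (fun val x => PySem.Int.mod (val * 3 + (x + 3)) pyMOD) 0

-- ===== PRECONDITION & SPEC =====
def Spec_toasts (num : List Int) (out : Int) : Prop := out = toasts_alt num
instance (num : List Int) (out : Int) : Decidable (Spec_toasts num out) := by unfold Spec_toasts; infer_instance

-- ===== CLAIM (what is proved, stated in full; the proofs are below) =====
def Claim_equal_toasts : Prop := ∀ (num : List Int), Dom_toasts num → Spec_toasts num (toasts num)

-- ===== LEMMAS AND PROOFS =====

-- the exact (un-reduced) value both programs compute mod pyMOD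
def polyV : List Int → Int
  | [] => 0
  | y :: r => (y + 3) * 3 ^ r.length + polyV r

theorem pyMOD_pos : (0 : Int) < pyMOD := by norm_num [pyMOD]

theorem powmod (a n : Int) (b : Nat) : a ^ b % n = (a % n) ^ b % n := by
  induction b with
  | zero => simp
  | succ k ih =>
    rw [pow_succ, pow_succ, Int.mul_emod, ih, ← Int.mul_emod, Int.mul_emod ((a % n) ^ k) a,
      Int.mul_emod ((a % n) ^ k) (a % n), Int.emod_emod_of_dvd _ dvd_rfl]

-- A's step: two mod-additions of (y-1)·p and 4·p collapse to one addition of (y+3)·p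
theorem stepA_mod (c y p : Int) :
    ((c % pyMOD + ((y - 1) * (p % pyMOD)) % pyMOD) % pyMOD + (4 * (p % pyMOD)) % pyMOD) % pyMOD
      = (c + (y + 3) * p) % pyMOD := by
  have e1 : ((y - 1) * (p % pyMOD)) % pyMOD = ((y - 1) * p) % pyMOD := by
    rw [Int.mul_emod, Int.emod_emod_of_dvd _ dvd_rfl, ← Int.mul_emod]
  have e2 : ((4 : Int) * (p % pyMOD)) % pyMOD = (4 * p) % pyMOD := by
    rw [Int.mul_emod, Int.emod_emod_of_dvd _ dvd_rfl, ← Int.mul_emod]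
  rw [e1, e2, ← Int.add_emod c ((y - 1) * p), ← Int.add_emod]
  congr 1; ring

-- B's step
theorem stepB_mod (v x : Int) :
    ((v % pyMOD) * 3 + (x + 3)) % pyMOD = (v * 3 + (x + 3)) % pyMOD := by
  rw [Int.add_emod, Int.mul_emod, Int.emod_emod_of_dvd _ dvd_rfl, ← Int.mul_emod, ← Int.add_emod]

theorem fexp3_nat (n : Nat) : fexp 3 (n : Int) = 3 ^ n % pyMOD := by
  induction n using Nat.strong_induction_on with
  | _ n ih =>
    match n with
    | 0 => rw [fexp]; norm_num [pyMOD]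
    | 1 => rw [fexp]; norm_num [pyMOD]
    | (k+2) =>
      rw [fexp]
      have h1 : ¬ ((((k : Nat) + 2 : Nat) : Int) ≤ 0) := by push_cast; omega
      have h2 : ¬ ((((k : Nat) + 2 : Nat) : Int) = 1) := by push_cast; omega
      rw [if_neg h1, if_neg h2]
      have hd : PySem.Int.floordiv (((k + 2 : Nat)) : Int) 2 = (((k + 2) / 2 : Nat) : Int) := by
        rw [PySem.Int.floordiv_eq_ediv_of_pos (by norm_num)]
        exact_mod_cast (Int.natCast_ediv (k + 2) 2).symm
      have hm : PySem.Int.mod (((k + 2 : Nat)) : Int) 2 = (((k + 2) % 2 : Nat) : Int) := by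
        rw [PySem.Int.mod_eq_emod_of_pos (by norm_num)]
        exact_mod_cast (Int.natCast_emod (k + 2) 2).symm
      have ihh := ih ((k + 2) / 2) (by omega)
      rw [hd, hm, ihh, PySem.Int.mod_eq_emod_of_pos pyMOD_pos, PySem.Int.mod_eq_emod_of_pos pyMOD_pos]
      by_cases he : (k + 2) % 2 = 0
      · rw [if_pos (by exact_mod_cast congrArg (Nat.cast : Nat → Int) he), ← powmod, ← pow_mul]
        congr 2
        omega
      · rw [if_neg (by intro h; exact he (by exact_mod_cast h))]
        have hexp : (3 : Int) ^ (k + 2) = ((3 : Int) ^ ((k + 2) / 2)) ^ 2 * 3 := by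
          rw [← pow_mul, ← pow_succ]
          congr 1
          omega
        rw [hexp, Int.mul_emod, Int.mul_emod (((3 : Int) ^ ((k + 2) / 2)) ^ 2) 3, ← powmod]

theorem toasts_loop (num : List Int) : ∀ (k j : Nat) (c : Int), j ≤ num.length → k = num.length - j →
    (PySem.List.pyRange (j : Int) (PySem.List.len num) 1).foldl (fun count i =>
      let temp := PySem.Int.mod ((PySem.List.pyGetD num i 0 - 1) * fexp 3 (PySem.List.len num - i - 1)) pyMOD
      let count := PySem.Int.mod (count + temp) pyMOD
      let temp := PySem.Int.mod (4 * fexp 3 (PySem.List.len num - i - 1)) pyMOD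
      PySem.Int.mod (count + temp) pyMOD) (c % pyMOD)
    = (c + polyV (num.drop j)) % pyMOD := by
  intro k
  induction k with
  | zero =>
    intro j c hj hk
    have hj' : j = num.length := by omega
    subst hj'
    rw [PySem.List.len_eq, PySem.List.pyRange_one_eq_nil (by omega)]
    simp [polyV]
  | succ k ih =>
    intro j c hj hk
    have hjlt : j < num.length := by omega
    rw [PySem.List.len_eq, PySem.List.pyRange_one_cons (by exact_mod_cast hjlt), List.foldl_cons]
    have hget : PySem.List.pyGetD num (j : Int) 0 = num[j] := by
      rw [PySem.List.pyGetD_natCast]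
      exact List.getD_eq_getElem num 0 hjlt
    have hexp : ((num.length : Int) - (j : Int) - 1) = ((num.length - j - 1 : Nat) : Int) := by
      omega
    have hstep' :
        (let temp := PySem.Int.mod ((PySem.List.pyGetD num (j : Int) 0 - 1) * fexp 3 ((num.length : Int) - (j : Int) - 1)) pyMOD;
         let count := PySem.Int.mod (c % pyMOD + temp) pyMOD;
         let temp := PySem.Int.mod (4 * fexp 3 ((num.length : Int) - (j : Int) - 1)) pyMOD;
         PySem.Int.mod (count + temp) pyMOD)
        = (c + (num[j] + 3) * 3 ^ (num.length - j - 1)) % pyMOD := by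
      simp only [hget, hexp, fexp3_nat, PySem.Int.mod_eq_emod_of_pos pyMOD_pos]
      exact stepA_mod c num[j] (3 ^ (num.length - j - 1))
    rw [hstep']
    have hcast : ((j : Int) + 1) = ((j + 1 : Nat) : Int) := by push_cast; ring
    simp only [← PySem.List.len_eq]
    rw [hcast, ih (j + 1) _ (by omega) (by omega), List.drop_eq_getElem_cons hjlt]
    simp only [polyV, List.length_drop]
    have h3 : num.length - (j + 1) = num.length - j - 1 := by omega
    rw [h3]
    congr 1
    ring

theorem alt_loop (xs : List Int) : ∀ (v : Int),
    xs.foldl (fun val x => PySem.Int.mod (val * 3 + (x + 3)) pyMOD) (v % pyMOD)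
    = (v * 3 ^ xs.length + polyV xs) % pyMOD := by
  induction xs with
  | nil => intro v; simp [polyV]
  | cons x r ih =>
    intro v
    rw [List.foldl_cons]
    have hstep : PySem.Int.mod ((v % pyMOD) * 3 + (x + 3)) pyMOD = (v * 3 + (x + 3)) % pyMOD := by
      rw [PySem.Int.mod_eq_emod_of_pos pyMOD_pos]
      exact stepB_mod v x
    rw [hstep, ih (v * 3 + (x + 3))]
    show _ = (v * 3 ^ (r.length + 1) + ((x + 3) * 3 ^ r.length + polyV r)) % pyMOD
    congr 1
    ring

-- ===== VERDICT (by name: the statement is the Claim_ definition above) =====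
theorem toasts_spec : Claim_equal_toasts := by
  intro num _
  unfold Spec_toasts toasts toasts_alt
  have hA := toasts_loop num num.length 0 0 (Nat.zero_le _) (by omega)
  have hB := alt_loop num 0
  simp only [Int.zero_emod, Nat.cast_zero, List.drop_zero, zero_add, zero_mul] at hA hB
  exact hA.trans hB.symm
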